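-- pv_equiv track=rewrite | github.com/Skaleras/code_signal | alternating_sums.py | solution
-- ===== SOURCE A (Python) =====
-- def solution(a):
--     team_a = []
--     team_b = []
--     for index, i in enumerate(a, start=1):
--         if index % 2 != 0:
--             team_a.append(i)
--         else:
--             team_b.append(i)
--
--     return [sum(team_a), sum(team_b)]
-- ===== SOURCE B (Python) =====
-- def solution(a):
--     total = 0
--     alt = 0
--     sign = 1
--     for x in a:
--         total += x
--         alt += sign * x
--         sign = -sign
--     return [(total + alt) // 2, (total - alt) // 2]
-- ===== Notes on version B (the rewrite author's own statement) =====
-- stated objective: alternative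
-- what changed: Instead of partitioning elements by position parity into two lists and summing each, B computes the plain total and the alternating (sign-flipping) sum in one pass and recovers the two team sums algebraically as (total+alt)//2 and (total-alt)//2.
import Mathlib
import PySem

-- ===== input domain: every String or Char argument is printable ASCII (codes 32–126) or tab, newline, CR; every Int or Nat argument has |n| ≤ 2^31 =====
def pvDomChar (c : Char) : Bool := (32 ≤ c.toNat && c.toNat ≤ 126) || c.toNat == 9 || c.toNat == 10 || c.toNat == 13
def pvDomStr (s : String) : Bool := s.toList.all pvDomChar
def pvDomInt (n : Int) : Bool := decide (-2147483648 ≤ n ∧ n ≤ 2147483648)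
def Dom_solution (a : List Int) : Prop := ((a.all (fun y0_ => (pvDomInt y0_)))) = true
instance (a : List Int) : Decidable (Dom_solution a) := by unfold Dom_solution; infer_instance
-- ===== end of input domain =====

-- B drops A's parity partition into two lists: it computes the total and the
-- alternating (sign-flipping) sum in one pass and recovers the two team sums
-- algebraically as (total+alt)//2 and (total-alt)//2 (objective: alternative).

-- ===== PORT A =====
def solution (a : List Int) : List Int :=
  let p := (PySem.List.enumerate a 1).foldl
    (fun (st : List Int × List Int) (xi : Int × Int) =>
      if PySem.Int.mod xi.1 2 ≠ 0 then (st.1 ++ [xi.2], st.2) else (st.1, st.2 ++ [xi.2]))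
    ([], [])
  [p.1.sum, p.2.sum]

-- ===== PORT B =====
def solution_alt (a : List Int) : List Int :=
  let st := a.foldl
    (fun (st : Int × Int × Int) (x : Int) => (st.1 + x, st.2.1 + st.2.2 * x, -st.2.2))
    (0, 0, 1)
  [PySem.Int.floordiv (st.1 + st.2.1) 2, PySem.Int.floordiv (st.1 - st.2.1) 2]

-- ===== PRECONDITION & SPEC =====
def Spec_solution (a : List Int) (out : List Int) : Prop := out = solution_alt a
instance (a : List Int) (out : List Int) : Decidable (Spec_solution a out) := by unfold Spec_solution; infer_instance

-- ===== CLAIM (what is proved, stated in full; the proofs are below) =====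
def Claim_equal_solution : Prop := ∀ (a : List Int), Dom_solution a → Spec_solution a (solution a)

-- ===== LEMMAS AND PROOFS =====

-- Sums of the elements at odd and even 1-based positions, by two-step recursion.
def posSums : List Int → Int × Int
  | [] => (0, 0)
  | [x] => (x, 0)
  | x :: y :: r => ((posSums r).1 + x, (posSums r).2 + y)

lemma two_step_ind {motive : List Int → Prop} (h0 : motive [])
    (h1 : ∀ x, motive [x]) (h2 : ∀ x y l, motive l → motive (x :: y :: l)) :
    ∀ l, motive l :=
  fun l => posSums.induct (motive := fun a => motive a)
    h0 h1 (fun x y rest ih => h2 x y rest ih) l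

lemma mod2_odd (k : Nat) : PySem.Int.mod (2 * (k : Int) + 1) 2 = 1 := by
  simp [PySem.Int.mod]

lemma mod2_even (k : Nat) : PySem.Int.mod (2 * (k : Int) + 2) 2 = 0 := by
  simp [PySem.Int.mod]

lemma a_fold : ∀ (a : List Int) (k : Nat) (la lb : List Int),
    (((PySem.List.enumerate a (2 * (k : Int) + 1)).foldl
      (fun (st : List Int × List Int) (xi : Int × Int) =>
        if PySem.Int.mod xi.1 2 ≠ 0 then (st.1 ++ [xi.2], st.2) else (st.1, st.2 ++ [xi.2]))
      (la, lb)).1.sum,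
     ((PySem.List.enumerate a (2 * (k : Int) + 1)).foldl
      (fun (st : List Int × List Int) (xi : Int × Int) =>
        if PySem.Int.mod xi.1 2 ≠ 0 then (st.1 ++ [xi.2], st.2) else (st.1, st.2 ++ [xi.2]))
      (la, lb)).2.sum)
    = (la.sum + (posSums a).1, lb.sum + (posSums a).2) := by
  intro a
  induction a using two_step_ind with
  | h0 => intro k la lb; simp [PySem.List.enumerate, posSums]
  | h1 x => intro k la lb
            simp [PySem.List.enumerate_cons, PySem.List.enumerate_nil, posSums]
  | h2 x y rest ih =>
    intro k la lb
    have h1 : (2 * (k : Int) + 1) + 1 = 2 * (k : Int) + 2 := by ring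
    have h2 : (2 * (k : Int) + 2) + 1 = 2 * ((k + 1 : Nat) : Int) + 1 := by push_cast; ring
    have h := ih (k + 1) (la ++ [x]) (lb ++ [y])
    simp only [Prod.mk.injEq, List.sum_append, List.sum_cons, List.sum_nil] at h
    simp only [PySem.List.enumerate_cons, List.foldl_cons, mod2_odd k, h1, mod2_even k, h2,
      ne_eq, one_ne_zero, not_false_eq_true, if_true, not_true_eq_false, if_false,
      Prod.mk.injEq, posSums]
    exact ⟨by rw [h.1]; ring, by rw [h.2]; ring⟩

lemma b_fold : ∀ (a : List Int) (t al : Int),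
    a.foldl (fun (st : Int × Int × Int) (x : Int) => (st.1 + x, st.2.1 + st.2.2 * x, -st.2.2))
      (t, al, 1)
    = (t + (posSums a).1 + (posSums a).2, al + (posSums a).1 - (posSums a).2,
       if a.length % 2 = 0 then 1 else -1) := by
  intro a
  induction a using two_step_ind with
  | h0 => intro t al; simp [posSums]
  | h1 x => intro t al; simp [posSums]
  | h2 x y rest ih =>
    intro t al
    simp only [List.foldl_cons, one_mul, neg_neg]
    rw [show al + x + -1 * y = al + x - y from by ring, ih]
    simp only [posSums, List.length_cons, Prod.mk.injEq]
    have hmod : (rest.length + 1 + 1) % 2 = rest.length % 2 := by omega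
    refine ⟨by ring, by ring, by simp [hmod]⟩

-- ===== VERDICT (by name: the statement is the Claim_ definition above) =====
theorem solution_spec : Claim_equal_solution := by
  intro a _
  unfold Spec_solution solution solution_alt
  have ha := a_fold a 0 [] []
  have hb := b_fold a 0 0
  simp only [List.sum_nil, show (2 * ((0 : Nat) : Int) + 1) = 1 from by norm_num,
    zero_add] at ha hb
  have ha1 := congrArg Prod.fst ha
  have ha2 := congrArg Prod.snd ha
  simp only at ha1 ha2
  simp only [hb, ha1, ha2]
  have e1 : (posSums a).1 + (posSums a).2 + ((posSums a).1 - (posSums a).2)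
      = 2 * (posSums a).1 := by ring
  have e2 : (posSums a).1 + (posSums a).2 - ((posSums a).1 - (posSums a).2)
      = 2 * (posSums a).2 := by ring
  simp only [e1, e2, PySem.Int.floordiv,
    Int.mul_fdiv_cancel_left _ (by norm_num : (2 : Int) ≠ 0)]
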